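-- pv_equiv track=rewrite | github.com/RCPawn/algorithm-notes | day07/count_bits.py | countBits1
-- ===== SOURCE A (Python) =====
-- def countBits1(n):
--     def count_ones(num):
--         ones = 0
--         while num > 0:
--             # 消除二进制最低位的 1
--             num &= (num - 1)
--             # 每消除一个 1, ones + 1
--             ones += 1
--         return ones
--
--     return [count_ones(num) for num in range(n + 1)]
-- ===== SOURCE B (Python) =====
-- def countBits1(n):
--     # O(n) dynamic programming: bits(i) = bits(i >> 1) + (i & 1)
--     dp = [0] * (n + 1)
--     for i in range(1, n + 1):
--         dp[i] = dp[i >> 1] + (i & 1)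
--     return dp
-- ===== Notes on version B (the rewrite author's own statement) =====
-- stated objective: faster
-- what changed: replaces the per-number Kernighan bit-clearing loop (O(n log n) total) with a single O(n) DP pass dp[i] = dp[i>>1] + (i&1) over a preallocated list
import Mathlib
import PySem

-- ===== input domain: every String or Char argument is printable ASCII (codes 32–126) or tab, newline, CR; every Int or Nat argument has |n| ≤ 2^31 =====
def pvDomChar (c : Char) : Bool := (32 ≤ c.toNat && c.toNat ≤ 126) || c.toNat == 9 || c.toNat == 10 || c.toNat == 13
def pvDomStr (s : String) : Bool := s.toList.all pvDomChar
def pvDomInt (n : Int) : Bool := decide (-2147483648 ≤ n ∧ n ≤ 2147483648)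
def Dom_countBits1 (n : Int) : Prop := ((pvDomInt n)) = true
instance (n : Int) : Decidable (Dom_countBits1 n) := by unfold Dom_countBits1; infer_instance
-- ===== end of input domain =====

-- B replaces A's per-number Kernighan bit-clearing loop with a single O(n) DP pass
-- dp[i] = dp[i >> 1] + (i & 1) over a preallocated list (objective: faster, asymptotic).

-- ===== PORT A =====
-- the 'while num > 0: num &= num - 1; ones += 1' loop of count_ones
def countOnesGo (num : Int) (ones : Int) : Int :=
  if h : 0 < num then
    countOnesGo (PySem.Int.band num (num - 1)) (ones + 1)
  else
    ones
termination_by num.toNat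
decreasing_by
  obtain ⟨k, hk⟩ : ∃ k : Nat, num = (k : Int) := ⟨num.toNat, by omega⟩
  subst hk
  rw [show ((k : Int) - 1) = ((k - 1 : Nat) : Int) by omega, PySem.Int.band_natCast]
  have h2 := @Nat.and_le_right k (k - 1)
  simp only [Int.toNat_natCast]
  omega

def countBits1 (n : Int) : List Int :=
  (PySem.List.pyRange 0 (n + 1) 1).map (fun num => countOnesGo num 0)

-- ===== PORT B =====
def countBits1_alt (n : Int) : List Int :=
  (PySem.List.pyRange 1 (n + 1) 1).foldl
    (fun dp i =>
      -- dp[i] = dp[i >> 1] + (i & 1); i is always a valid index, so pySetD/pyGetD are exact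
      PySem.List.pySetD dp i (PySem.List.pyGetD dp (i >>> (1 : Nat)) 0 + PySem.Int.band i 1))
    (List.replicate (n + 1).toNat 0)     -- [0] * (n + 1)

-- ===== PRECONDITION & SPEC =====
def Spec_countBits1 (n : Int) (out : List Int) : Prop := out = countBits1_alt n
instance (n : Int) (out : List Int) : Decidable (Spec_countBits1 n out) := by unfold Spec_countBits1; infer_instance

-- ===== CLAIM (what is proved, stated in full; the proofs are below) =====
def Claim_equal_countBits1 : Prop := ∀ (n : Int), Dom_countBits1 n → Spec_countBits1 n (countBits1 n)

-- ===== LEMMAS AND PROOFS =====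

-- bit-count spec both sides are compared to
def gBits (i : Int) : Int := (PySem.Int.bitCount i : Int)

-- unconditional halving equation for bitCount on Nat casts
lemma bc_halve (m : Nat) : PySem.Int.bitCount (m : Int) = m % 2 + PySem.Int.bitCount ((m / 2 : Nat) : Int) := by
  rcases Nat.eq_zero_or_pos m with h | h
  · subst h; decide
  · exact PySem.Int.bitCount_natCast h

lemma and_mod_two (m n : Nat) : (m &&& n) % 2 = m % 2 * (n % 2) := by
  have h := @Nat.and_mod_two_eq_one m n
  rcases Nat.mod_two_eq_zero_or_one m with h2 | h2 <;>
    rcases Nat.mod_two_eq_zero_or_one n with h3 | h3 <;> rw [h2, h3]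
  · have hne : (m &&& n) % 2 ≠ 1 := fun hc => by have := (h.mp hc).1; omega
    omega
  · have hne : (m &&& n) % 2 ≠ 1 := fun hc => by have := (h.mp hc).1; omega
    omega
  · have hne : (m &&& n) % 2 ≠ 1 := fun hc => by have := (h.mp hc).2; omega
    omega
  · have heq : (m &&& n) % 2 = 1 := h.mpr ⟨h2, h3⟩
    omega

-- clearing the lowest set bit drops the bit count by exactly one
lemma bitCount_and_pred (k : Nat) (hk : 0 < k) :
    PySem.Int.bitCount ((k &&& (k - 1) : Nat) : Int) + 1 = PySem.Int.bitCount (k : Int) := by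
  induction k using Nat.strong_induction_on with
  | _ k ih =>
    have hj2 : (k &&& (k - 1)) % 2 = 0 := by
      rw [and_mod_two]
      rcases Nat.mod_two_eq_zero_or_one k with h | h
      · simp [h]
      · simp [h]; omega
    have hjd : (k &&& (k - 1)) / 2 = k / 2 &&& (k - 1) / 2 := Nat.and_div_two
    rw [bc_halve (k &&& (k - 1)), bc_halve k, hj2, hjd]
    rcases Nat.mod_two_eq_zero_or_one k with h | h
    · -- k even, recurse on k / 2
      have e1 : (k - 1) / 2 = k / 2 - 1 := by omega
      have e2 : 0 < k / 2 := by omega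
      have := ih (k / 2) (by omega) e2
      rw [e1]
      omega
    · -- k odd: k / 2 = (k - 1) / 2
      have e1 : (k - 1) / 2 = k / 2 := by omega
      rw [e1, Nat.and_self, h]
      omega

-- A's loop computes acc + popcount
lemma countOnesGo_eq (k : Nat) : ∀ acc : Int, countOnesGo (k : Int) acc = acc + gBits (k : Int) := by
  induction k using Nat.strong_induction_on with
  | _ k ih =>
    intro acc
    rcases Nat.eq_zero_or_pos k with h | h
    · subst h; rw [countOnesGo]; simp [gBits]
    · rw [countOnesGo]
      have hpos : (0 : Int) < (k : Int) := by exact_mod_cast h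
      have h1 : (k : Int) - 1 = ((k - 1 : Nat) : Int) := by omega
      rw [dif_pos hpos, h1, PySem.Int.band_natCast]
      have hlt : k &&& (k - 1) < k := by
        have := @Nat.and_le_right k (k - 1); omega
      rw [ih _ hlt]
      have := bitCount_and_pred k h
      simp only [gBits]
      omega

-- Int right shift by one is ediv by two
lemma shiftRight_one (i : Int) : i >>> (1 : Nat) = i / 2 := by
  rw [Int.shiftRight_eq_div_pow]; norm_num

-- halving equation for gBits
lemma gBits_step (m : Nat) :
    gBits ((m + 1 : Nat) : Int) = gBits (((m + 1) / 2 : Nat) : Int) + ((m + 1) % 2 : Nat) := by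
  simp only [gBits]
  rw [bc_halve (m + 1)]
  push_cast
  ring

-- B's fold invariant
lemma alt_invariant (N : Nat) : ∀ m : Nat, m + 1 ≤ N →
    (PySem.List.pyRange 1 (1 + (m : Int)) 1).foldl
      (fun dp i =>
        PySem.List.pySetD dp i (PySem.List.pyGetD dp (i >>> (1 : Nat)) 0 + PySem.Int.band i 1))
      (List.replicate N 0) =
    (PySem.List.pyRange 0 (1 + (m : Int)) 1).map gBits ++ List.replicate (N - (m + 1)) 0 := by
  intro m
  induction m with
  | zero =>
    intro hN
    rw [show ((1 : Int) + (0:Nat)) = 1 by norm_num]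
    rw [PySem.List.pyRange_one_eq_nil (le_refl 1), List.foldl_nil]
    rw [show (PySem.List.pyRange 0 1 1) = [0] from rfl]
    have : gBits 0 = 0 := by decide
    simp only [List.map_cons, List.map_nil, this]
    cases N with
    | zero => omega
    | succ k => simp [List.replicate_succ]
  | succ m ih =>
    intro hN
    have h1 : (1 : Int) + ((m+1 : Nat) : Int) = (1 + (m:Int)) + 1 := by push_cast; ring
    rw [h1, PySem.List.pyRange_one_succ_right (by omega), List.foldl_append, ih (by omega)]
    simp only [List.foldl_cons, List.foldl_nil]
    -- the new element
    have hcast : (1 : Int) + (m : Int) = ((m+1 : Nat) : Int) := by push_cast; ring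
    rw [hcast]
    rw [shiftRight_one, show (((m+1:Nat)) : Int) / 2 = (((m+1)/2 : Nat) : Int) from (Int.natCast_ediv (m+1) 2).symm]
    -- index (m+1)/2 lies in the computed prefix
    have hlen : ((PySem.List.pyRange 0 ((m+1:Nat) : Int) 1).map gBits).length = m + 1 := by
      simp [PySem.List.length_pyRange_one]
    have hget : PySem.List.pyGetD
        ((PySem.List.pyRange 0 ((m+1:Nat) : Int) 1).map gBits ++ List.replicate (N - (m+1)) 0)
        (((m+1)/2 : Nat) : Int) 0 = gBits ((((m+1)/2 : Nat)) : Int) := by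
      rw [PySem.List.pyGetD_natCast, List.getD_append _ _ _ _ (by omega),
          ← PySem.List.pyGetD_natCast, PySem.List.pyGetD_map_pyRange gBits (m+1) ((m+1)/2) 0 (by omega)]
    rw [hget]
    have hband : PySem.Int.band ((m+1:Nat) : Int) 1 = (((m+1) % 2 : Nat) : Int) := by
      rw [show (1 : Int) = ((1:Nat) : Int) from rfl, PySem.Int.band_natCast, Nat.and_one_is_mod]
    rw [hband, PySem.List.pySetD_natCast]
    -- performing the set
    have hsplit : N - (m+1) = (N - (m+2)) + 1 := by omega
    rw [hsplit, List.replicate_succ]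
    rw [List.set_append]
    rw [if_neg (by omega)]
    simp only [hlen, Nat.sub_self, List.set_cons_zero]
    rw [← gBits_step m]
    rw [PySem.List.pyRange_one_succ_right (by omega), List.map_append, List.map_cons, List.map_nil]
    simp

-- assemble
lemma ports_agree (n : Int) : countBits1 n = countBits1_alt n := by
  unfold countBits1 countBits1_alt
  rcases lt_or_ge n 0 with hn | hn
  · rw [PySem.List.pyRange_one_eq_nil (by omega), PySem.List.pyRange_one_eq_nil (by omega),
        List.foldl_nil, show (n+1).toNat = 0 by omega]
    simp
  · obtain ⟨m, hm⟩ : ∃ m : Nat, n = (m : Int) := ⟨n.toNat, by omega⟩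
    subst hm
    have e1 : (m : Int) + 1 = 1 + (m : Int) := by ring
    have e2 : ((m : Int) + 1).toNat = m + 1 := by omega
    rw [e2, e1, alt_invariant (m+1) m (le_refl _), Nat.sub_self, List.replicate_zero,
        List.append_nil]
    apply List.map_congr_left
    intro x hx
    rw [PySem.List.mem_pyRange_one] at hx
    obtain ⟨k, hk⟩ : ∃ k : Nat, x = (k : Int) := ⟨x.toNat, by omega⟩
    subst hk
    rw [countOnesGo_eq k 0, zero_add]

-- ===== VERDICT (by name: the statement is the Claim_ definition above) =====
theorem countBits1_spec : Claim_equal_countBits1 := by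
  intro n _
  unfold Spec_countBits1
  exact ports_agree n
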